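-- pv_equiv track=rewrite | github.com/yugotakada/FWO-color-code | src/FWO_color_code_488.py | str_cat_ancilla_decoding_z_meas_error_include
-- ===== SOURCE A (Python) =====
-- def reorder_list_len4_elements_z_meas_after(input_list):
--     output = []
--     for i in range(0, len(input_list), 4):
--         chunk = input_list[i:i + 4]
--         if len(chunk) == 4:
--             reordered_chunk = [chunk[3], chunk[1], chunk[0], chunk[2]]
--             output.extend(reordered_chunk)
--
--     return output
--
-- def extract_specific_indices_len4_elements(input_list):
--     output = []
--     for i in range(0, len(input_list), 4):
--         chunk = input_list[i:i + 4]
--         if len(chunk) == 4: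
--             extracted_elements = [chunk[1], chunk[2]]
--             output.extend(extracted_elements)
--
--     return output
--
-- def str_cat_ancilla_decoding_z_meas_error_include(
--     ancilla_index_list, num_qubit, p="{p}"
-- ):
--     output = []
--     len2_elements = [
--         num for sublist in ancilla_index_list if len(sublist) == 2 for num in sublist
--     ]
--     len2_elements = [len2_elements[i ^ 1] for i in range(len(len2_elements))]
--
--     len4_elements = [
--         num for sublist in ancilla_index_list if len(sublist) == 4 for num in sublist
--     ]
--     extract_reverse = [extract_specific_indices_len4_elements(len4_elements)[i ^ 1] for i in range(len(extract_specific_indices_len4_elements(len4_elements)))]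
--
--     output.append("CX " + " ".join(map(str, reorder_list_len4_elements_z_meas_after(len4_elements))))
--     output.append("DEPOLARIZE2(" + p + ") " + " ".join(map(str, reorder_list_len4_elements_z_meas_after(len4_elements))))
--     output.append("DEPOLARIZE1(" + p + ") " + " ".join(map(str, range(num_qubit))))
--     output.append("CX " + " ".join(map(str, extract_reverse)))
--     output.append("DEPOLARIZE2(" + p + ") " + " ".join(map(str, extract_reverse)))
--     output.append("DEPOLARIZE1(" + p + ") " + " ".join(map(str, range(num_qubit))))
--     output.append("CX " + " ".join(map(str, len2_elements)))
--     output.append("DEPOLARIZE2(" + p + ") " + " ".join(map(str, len2_elements)))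
--
--     return "\n".join(output)
-- ===== SOURCE B (Python) =====
-- def str_cat_ancilla_decoding_z_meas_error_include(
--     ancilla_index_list, num_qubit, p="{p}"
-- ):
--     cx4, ext, cx2 = [], [], []
--     for s in ancilla_index_list:
--         if len(s) == 4:
--             cx4 += [s[3], s[1], s[0], s[2]]
--             ext += [s[2], s[1]]
--         elif len(s) == 2:
--             cx2 += [s[1], s[0]]
--     dep1 = " ".join(map(str, range(num_qubit)))
--     cx4_s = " ".join(map(str, cx4))
--     ext_s = " ".join(map(str, ext))
--     cx2_s = " ".join(map(str, cx2))
--     return "\n".join([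
--         "CX " + cx4_s,
--         "DEPOLARIZE2(" + p + ") " + cx4_s,
--         "DEPOLARIZE1(" + p + ") " + dep1,
--         "CX " + ext_s,
--         "DEPOLARIZE2(" + p + ") " + ext_s,
--         "DEPOLARIZE1(" + p + ") " + dep1,
--         "CX " + cx2_s,
--         "DEPOLARIZE2(" + p + ") " + cx2_s,
--     ])
-- ===== Notes on version B (the rewrite author's own statement) =====
-- stated objective: simpler
-- what changed: B makes a single pass over ancilla_index_list keeping three result lists (cx4, ext, cx2) per sublist, replacing A's flatten-then-rechunk helper pipeline (filter+flatten comprehensions, slice-by-4 helpers called repeatedly, and i^1 xor-swap index comprehensions).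
import Mathlib
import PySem

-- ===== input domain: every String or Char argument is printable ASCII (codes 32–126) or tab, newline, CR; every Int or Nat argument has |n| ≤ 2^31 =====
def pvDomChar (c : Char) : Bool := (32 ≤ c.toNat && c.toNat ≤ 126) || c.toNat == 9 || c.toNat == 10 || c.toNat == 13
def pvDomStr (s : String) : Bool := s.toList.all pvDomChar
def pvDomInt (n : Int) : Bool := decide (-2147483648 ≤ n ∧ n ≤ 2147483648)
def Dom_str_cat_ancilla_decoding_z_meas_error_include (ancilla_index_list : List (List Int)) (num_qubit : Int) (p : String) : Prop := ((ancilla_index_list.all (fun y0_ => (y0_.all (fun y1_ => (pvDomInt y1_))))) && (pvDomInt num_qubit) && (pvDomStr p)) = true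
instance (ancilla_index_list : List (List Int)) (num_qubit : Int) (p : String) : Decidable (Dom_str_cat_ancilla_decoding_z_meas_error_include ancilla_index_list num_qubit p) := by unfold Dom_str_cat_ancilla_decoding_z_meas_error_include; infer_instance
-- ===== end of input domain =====

-- B replaces A's flatten-then-rechunk helper pipeline and i^1 swap tricks by one pass over the
-- original sublists maintaining three result lists (same cost; objective: simpler decomposition).


-- ===== PORT A =====
-- reorder_list_len4_elements_z_meas_after: chunk[k] is ported with pyGetD (default 0): the
-- access is guarded by len(chunk) == 4, so Python never raises there and the default is dead.
def pvReorder4 (input_list : List Int) : List Int :=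
  (PySem.List.pyRange 0 (input_list.length : Int) 4).foldl (fun output i =>
    let chunk := PySem.List.slice input_list (some i) (some (i + 4))
    if chunk.length = 4 then
      output ++ [PySem.List.pyGetD chunk 3 0, PySem.List.pyGetD chunk 1 0,
                 PySem.List.pyGetD chunk 0 0, PySem.List.pyGetD chunk 2 0]
    else output) []

-- extract_specific_indices_len4_elements
def pvExtract4 (input_list : List Int) : List Int :=
  (PySem.List.pyRange 0 (input_list.length : Int) 4).foldl (fun output i =>
    let chunk := PySem.List.slice input_list (some i) (some (i + 4))
    if chunk.length = 4 then
      output ++ [PySem.List.pyGetD chunk 1 0, PySem.List.pyGetD chunk 2 0]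
    else output) []

-- [lst[i ^ 1] for i in range(len(lst))]; lst[i ^ 1] with pyGetD: lst always has even length
-- here (it is a flattening of 2-element blocks), so i ^ 1 is always in range and Python never raises.
def pvXorSwap (lst : List Int) : List Int :=
  (PySem.List.pyRange 0 (lst.length : Int) 1).map
    (fun i => PySem.List.pyGetD lst (PySem.Int.bxor i 1) 0)

def str_cat_ancilla_decoding_z_meas_error_include (ancilla_index_list : List (List Int)) (num_qubit : Int) (p : String) : String :=
  let len2_elements := (ancilla_index_list.filter (fun sublist => sublist.length == 2)).flatMap (fun sublist => sublist)
  let len2_elements' := pvXorSwap len2_elements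
  let len4_elements := (ancilla_index_list.filter (fun sublist => sublist.length == 4)).flatMap (fun sublist => sublist)
  let extract_reverse := pvXorSwap (pvExtract4 len4_elements)
  let output : List String := ([] : List String)
    ++ ["CX " ++ PySem.Str.join " " ((pvReorder4 len4_elements).map PySem.Int.toStr)]
    ++ ["DEPOLARIZE2(" ++ p ++ ") " ++ PySem.Str.join " " ((pvReorder4 len4_elements).map PySem.Int.toStr)]
    ++ ["DEPOLARIZE1(" ++ p ++ ") " ++ PySem.Str.join " " ((PySem.List.pyRange 0 num_qubit 1).map PySem.Int.toStr)]
    ++ ["CX " ++ PySem.Str.join " " (extract_reverse.map PySem.Int.toStr)]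
    ++ ["DEPOLARIZE2(" ++ p ++ ") " ++ PySem.Str.join " " (extract_reverse.map PySem.Int.toStr)]
    ++ ["DEPOLARIZE1(" ++ p ++ ") " ++ PySem.Str.join " " ((PySem.List.pyRange 0 num_qubit 1).map PySem.Int.toStr)]
    ++ ["CX " ++ PySem.Str.join " " (len2_elements'.map PySem.Int.toStr)]
    ++ ["DEPOLARIZE2(" ++ p ++ ") " ++ PySem.Str.join " " (len2_elements'.map PySem.Int.toStr)]
  PySem.Str.join "\n" output

-- ===== PORT B =====
-- one pass over ancilla_index_list, three accumulators (cx4, ext, cx2)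
def pvStepB (acc : List Int × List Int × List Int) (s : List Int) : List Int × List Int × List Int :=
  if s.length = 4 then
    (acc.1 ++ [PySem.List.pyGetD s 3 0, PySem.List.pyGetD s 1 0,
               PySem.List.pyGetD s 0 0, PySem.List.pyGetD s 2 0],
     acc.2.1 ++ [PySem.List.pyGetD s 2 0, PySem.List.pyGetD s 1 0],
     acc.2.2)
  else if s.length = 2 then
    (acc.1, acc.2.1, acc.2.2 ++ [PySem.List.pyGetD s 1 0, PySem.List.pyGetD s 0 0])
  else acc

def str_cat_ancilla_decoding_z_meas_error_include_alt (ancilla_index_list : List (List Int)) (num_qubit : Int) (p : String) : String :=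
  let acc := ancilla_index_list.foldl pvStepB ([], [], [])
  let dep1 := PySem.Str.join " " ((PySem.List.pyRange 0 num_qubit 1).map PySem.Int.toStr)
  let cx4_s := PySem.Str.join " " (acc.1.map PySem.Int.toStr)
  let ext_s := PySem.Str.join " " (acc.2.1.map PySem.Int.toStr)
  let cx2_s := PySem.Str.join " " (acc.2.2.map PySem.Int.toStr)
  PySem.Str.join "\n"
    [ "CX " ++ cx4_s,
      "DEPOLARIZE2(" ++ p ++ ") " ++ cx4_s,
      "DEPOLARIZE1(" ++ p ++ ") " ++ dep1,
      "CX " ++ ext_s,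
      "DEPOLARIZE2(" ++ p ++ ") " ++ ext_s,
      "DEPOLARIZE1(" ++ p ++ ") " ++ dep1,
      "CX " ++ cx2_s,
      "DEPOLARIZE2(" ++ p ++ ") " ++ cx2_s ]

-- ===== PRECONDITION & SPEC =====
def Spec_str_cat_ancilla_decoding_z_meas_error_include (ancilla_index_list : List (List Int)) (num_qubit : Int) (p : String) (out : String) : Prop := out = str_cat_ancilla_decoding_z_meas_error_include_alt ancilla_index_list num_qubit p
instance (ancilla_index_list : List (List Int)) (num_qubit : Int) (p : String) (out : String) : Decidable (Spec_str_cat_ancilla_decoding_z_meas_error_include ancilla_index_list num_qubit p out) := by unfold Spec_str_cat_ancilla_decoding_z_meas_error_include; infer_instance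

-- ===== CLAIM (what is proved, stated in full; the proofs are below) =====
def Claim_equal_str_cat_ancilla_decoding_z_meas_error_include : Prop := ∀ (ancilla_index_list : List (List Int)) (num_qubit : Int) (p : String), Dom_str_cat_ancilla_decoding_z_meas_error_include ancilla_index_list num_qubit p → Spec_str_cat_ancilla_decoding_z_meas_error_include ancilla_index_list num_qubit p (str_cat_ancilla_decoding_z_meas_error_include ancilla_index_list num_qubit p)

-- ===== LEMMAS AND PROOFS =====

-- the common "chunk by 4 and map g over full chunks" shape of A's two helpers, structurally
def pvChunkMap (g : List Int → List Int) : List Int → List Int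
  | a :: b :: c :: d :: t => g [a, b, c, d] ++ pvChunkMap g t
  | _ => []

theorem pvRange4_cons (n : Nat) :
    PySem.List.pyRange 0 ((n : Int) + 4) 4 = 0 :: (PySem.List.pyRange 0 (n : Int) 4).map (· + 4) := by
  rw [PySem.List.pyRange_of_pos _ _ (by norm_num), PySem.List.pyRange_of_pos _ _ (by norm_num)]
  have h4 : (0:Int) < (n:Int) + 4 := by positivity
  rw [if_pos h4]
  by_cases hn : (0:Int) < (n:Int)
  · rw [if_pos hn]
    have hcnt : (((n:Int) + 4 - 0 + 4 - 1) / 4).toNat = (((n:Int) - 0 + 4 - 1) / 4).toNat + 1 := by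
      omega
    rw [hcnt, List.range_succ_eq_map]
    simp only [List.map_cons, List.map_map]
    refine List.cons_eq_cons.mpr ⟨by norm_num, ?_⟩
    apply List.map_congr_left
    intro k _
    simp only [Function.comp_apply]
    push_cast
    ring
  · rw [if_neg hn]
    have hn0 : n = 0 := by omega
    subst hn0
    norm_num
theorem pvFoldl4 (g : List Int → List Int) (l : List Int) :
    ∀ (init : List Int),
    (PySem.List.pyRange 0 (l.length : Int) 4).foldl (fun output i =>
      let chunk := PySem.List.slice l (some i) (some (i + 4))
      if chunk.length = 4 then output ++ g chunk else output) init
    = init ++ pvChunkMap g l := by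
  induction l using pvChunkMap.induct with
  | case1 a b c d t ih =>
    intro init
    have hlen : (((a :: b :: c :: d :: t).length : Nat) : Int) = ((t.length : Nat) : Int) + 4 := by
      push_cast [List.length_cons]; ring
    rw [hlen, pvRange4_cons, List.foldl_cons]
    have hc : PySem.List.slice (a :: b :: c :: d :: t) (some 0) (some (0 + 4)) = [a, b, c, d] := by
      rw [PySem.List.slice_toNat (a :: b :: c :: d :: t)
            (show (0:Int) ≤ 0 by norm_num) (show (0:Int) ≤ 0 + 4 by norm_num)]
      rfl
    simp only [hc, List.length_cons, List.length_nil]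
    rw [List.foldl_map]
    rw [PySem.List.foldl_congr_mem _ _ (fun output i =>
      let chunk := PySem.List.slice t (some i) (some (i + 4))
      if chunk.length = 4 then output ++ g chunk else output) _ ?_]
    · rw [ih]
      simp [pvChunkMap, List.append_assoc]
    · intro acc x hx
      obtain ⟨hx0, -, -⟩ := (PySem.List.mem_pyRange_iff_of_pos (by norm_num) x).mp hx
      have h1 : PySem.List.slice (a :: b :: c :: d :: t) (some (x + 4)) (some (x + 4 + 4))
          = PySem.List.slice t (some x) (some (x + 4)) := by
        rw [PySem.List.slice_toNat (a :: b :: c :: d :: t)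
              (show (0:Int) ≤ x + 4 by omega) (show (0:Int) ≤ x + 4 + 4 by omega),
            PySem.List.slice_toNat t
              (show (0:Int) ≤ x by omega) (show (0:Int) ≤ x + 4 by omega)]
        have c1 : (x + 4 + 4).toNat - (x + 4).toNat = 4 := by omega
        have c2 : (x + 4).toNat - x.toNat = 4 := by omega
        have c3 : List.drop (x + 4).toNat (a :: b :: c :: d :: t) = List.drop x.toNat t := by
          rw [show (x + 4).toNat = x.toNat + 1 + 1 + 1 + 1 by omega]
          simp [List.drop_succ_cons]
        rw [c1, c2, c3]
      simp only [h1]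
  | case2 l h1 =>
    intro init
    rcases l with _ | ⟨a, _ | ⟨b, _ | ⟨c, _ | ⟨d, t⟩⟩⟩⟩
    · simp [pvChunkMap, PySem.List.pyRange_of_pos 0 0 (show (0:Int) < 4 by norm_num)]
    · rw [show ((([a] : List Int).length : Nat) : Int) = 1 by norm_num]
      rw [PySem.List.pyRange_of_pos _ _ (show (0:Int) < 4 by norm_num)]
      have hsl : PySem.List.slice [a] (none : Option Int) (some (4 : Int)) = [a] := by
        rw [PySem.List.slice_to [a] (show (0:Int) ≤ 4 by norm_num)]
        rfl
      norm_num [pvChunkMap, hsl]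
    · rw [show (((a :: b :: [] : List Int)).length : Int) = 2 by norm_num]
      rw [PySem.List.pyRange_of_pos _ _ (show (0:Int) < 4 by norm_num)]
      have hsl : PySem.List.slice [a, b] (none : Option Int) (some (4 : Int)) = [a, b] := by
        rw [PySem.List.slice_to [a, b] (show (0:Int) ≤ 4 by norm_num)]
        rfl
      norm_num [pvChunkMap, hsl]
    · rw [show (((a :: b :: c :: [] : List Int)).length : Int) = 3 by norm_num]
      rw [PySem.List.pyRange_of_pos _ _ (show (0:Int) < 4 by norm_num)]
      have hsl : PySem.List.slice [a, b, c] (none : Option Int) (some (4 : Int)) = [a, b, c] := by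
        rw [PySem.List.slice_to [a, b, c] (show (0:Int) ≤ 4 by norm_num)]
        rfl
      norm_num [pvChunkMap, hsl]
    · exact absurd rfl (h1 a b c d t)

theorem pvReorder4_eq (l : List Int) :
    pvReorder4 l = pvChunkMap (fun chunk =>
      [PySem.List.pyGetD chunk 3 0, PySem.List.pyGetD chunk 1 0,
       PySem.List.pyGetD chunk 0 0, PySem.List.pyGetD chunk 2 0]) l := by
  unfold pvReorder4
  simpa using pvFoldl4 (fun chunk =>
      [PySem.List.pyGetD chunk 3 0, PySem.List.pyGetD chunk 1 0,
       PySem.List.pyGetD chunk 0 0, PySem.List.pyGetD chunk 2 0]) l []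

theorem pvExtract4_eq (l : List Int) :
    pvExtract4 l = pvChunkMap (fun chunk =>
      [PySem.List.pyGetD chunk 1 0, PySem.List.pyGetD chunk 2 0]) l := by
  unfold pvExtract4
  simpa using pvFoldl4 (fun chunk =>
      [PySem.List.pyGetD chunk 1 0, PySem.List.pyGetD chunk 2 0]) l []

theorem pvReorder4_cons4 (a b c d : Int) (t : List Int) :
    pvReorder4 (a :: b :: c :: d :: t) = d :: b :: a :: c :: pvReorder4 t := by
  rw [pvReorder4_eq, pvReorder4_eq, pvChunkMap]
  simp [PySem.List.pyGetD_ofNat', List.getD]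

theorem pvExtract4_cons4 (a b c d : Int) (t : List Int) :
    pvExtract4 (a :: b :: c :: d :: t) = b :: c :: pvExtract4 t := by
  rw [pvExtract4_eq, pvExtract4_eq, pvChunkMap]
  simp [PySem.List.pyGetD_ofNat', List.getD]

theorem pvNatXorOne (k : Nat) : k ^^^ 1 = 2 * (k / 2) + (1 - k % 2) := by
  have heven : ∀ q : Nat, (2 * q) ^^^ 1 = 2 * q + 1 := by
    intro q
    apply Nat.eq_of_testBit_eq; intro i
    rcases i with _ | j
    · simp [Nat.mul_comm]
    · simp [Nat.testBit_succ, Nat.mul_comm 2 q]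
  rcases Nat.even_or_odd k with ⟨q, hq⟩ | ⟨q, hq⟩
  · subst hq
    rw [show q + q = 2 * q by ring, heven q]
    omega
  · subst hq
    have : (2 * q + 1) ^^^ 1 = 2 * q := by
      rw [← heven q, Nat.xor_assoc]; simp
    rw [this]
    omega

theorem pvXorSwap_cons₂ (a b : Int) (t : List Int) :
    pvXorSwap (a :: b :: t) = b :: a :: pvXorSwap t := by
  unfold pvXorSwap
  have hlen : (((a :: b :: t).length : Nat) : Int) = ((t.length : Nat) : Int) + 2 := by
    push_cast [List.length_cons]; ring
  rw [hlen]
  rw [PySem.List.pyRange_one_cons (by positivity)]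
  rw [show (0:Int) + 1 = 1 by norm_num]
  rw [PySem.List.pyRange_one_cons (by omega)]
  rw [show (1:Int) + 1 = 2 by norm_num]
  simp only [List.map_cons]
  have hb0 : PySem.Int.bxor 0 1 = 1 := by decide
  have hb1 : PySem.Int.bxor 1 1 = 0 := by decide
  rw [hb0, hb1]
  have hga : PySem.List.pyGetD (a :: b :: t) 0 0 = a := by
    rw [PySem.List.pyGetD_ofNat' _ 0]; rfl
  have hgb : PySem.List.pyGetD (a :: b :: t) 1 0 = b := by
    rw [PySem.List.pyGetD_ofNat' _ 1]; rfl
  rw [hga, hgb]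
  refine List.cons_eq_cons.mpr ⟨rfl, List.cons_eq_cons.mpr ⟨rfl, ?_⟩⟩
  rw [PySem.List.pyRange_one 2, PySem.List.pyRange_one 0]
  have h2 : (((t.length : Nat) : Int) + 2 - 2).toNat = t.length := by omega
  have h0 : (((t.length : Nat) : Int) - 0).toNat = t.length := by omega
  rw [h2, h0, List.map_map, List.map_map]
  apply List.map_congr_left
  intro k _
  simp only [Function.comp_apply]
  have e1 : (2 : Int) + (k : Int) = ((2 + k : Nat) : Int) := by push_cast; ring
  have e2 : (0 : Int) + (k : Int) = ((k : Nat) : Int) := by ring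
  rw [e1, e2]
  have e3 : (1 : Int) = ((1 : Nat) : Int) := rfl
  rw [e3, PySem.Int.bxor_natCast, PySem.Int.bxor_natCast]
  have e4 : (2 + k) ^^^ 1 = 2 + (k ^^^ 1) := by
    rw [pvNatXorOne, pvNatXorOne]; omega
  rw [e4]
  rw [show ((2 + (k ^^^ 1) : Nat) : Int) = (((k ^^^ 1) + 2 : Nat) : Int) by push_cast; ring]
  rw [PySem.List.pyGetD_natCast, PySem.List.pyGetD_natCast]
  simp [List.getD]

-- B's fold with an arbitrary accumulator
theorem pvStepB_acc (anc : List (List Int)) (init : List Int × List Int × List Int) :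
    anc.foldl pvStepB init
      = (init.1 ++ (anc.foldl pvStepB ([], [], [])).1,
         init.2.1 ++ (anc.foldl pvStepB ([], [], [])).2.1,
         init.2.2 ++ (anc.foldl pvStepB ([], [], [])).2.2) := by
  induction anc generalizing init with
  | nil => simp
  | cons s t ih =>
    simp only [List.foldl_cons]
    rw [ih (pvStepB init s), ih (pvStepB ([], [], []) s)]
    have hs : pvStepB init s
        = (init.1 ++ (pvStepB ([], [], []) s).1,
           init.2.1 ++ (pvStepB ([], [], []) s).2.1,
           init.2.2 ++ (pvStepB ([], [], []) s).2.2) := by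
      unfold pvStepB
      split_ifs <;> simp
    rw [hs]
    simp [List.append_assoc]

theorem pvMain3 (anc : List (List Int)) :
    pvReorder4 ((anc.filter (fun s => s.length == 4)).flatMap (fun s => s))
        = (anc.foldl pvStepB ([], [], [])).1
    ∧ pvXorSwap (pvExtract4 ((anc.filter (fun s => s.length == 4)).flatMap (fun s => s)))
        = (anc.foldl pvStepB ([], [], [])).2.1
    ∧ pvXorSwap ((anc.filter (fun s => s.length == 2)).flatMap (fun s => s))
        = (anc.foldl pvStepB ([], [], [])).2.2 := by
  induction anc with
  | nil => refine ⟨?_, ?_, ?_⟩ <;> decide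
  | cons s t ih =>
    obtain ⟨ih1, ih2, ih3⟩ := ih
    have hfm : ∀ (L : List (List Int)), L.flatMap (fun s => s) = L.flatten := by
      intro L
      induction L with
      | nil => rfl
      | cons x xs ihx => simp [ihx]
    simp only [hfm] at ih1 ih2 ih3 ⊢
    rw [List.foldl_cons, pvStepB_acc t (pvStepB ([], [], []) s)]
    rcases s with _ | ⟨a, _ | ⟨b, _ | ⟨c, _ | ⟨d, _ | ⟨e, t0⟩⟩⟩⟩⟩
    · exact ⟨ih1, ih2, ih3⟩
    · exact ⟨ih1, ih2, ih3⟩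
    · -- s = [a, b]
      refine ⟨ih1, ih2, ?_⟩
      show pvXorSwap (a :: b :: (List.filter (fun s => s.length == 2) t).flatten)
          = [b, a] ++ (List.foldl pvStepB ([], [], []) t).2.2
      rw [pvXorSwap_cons₂, ih3]
      rfl
    · exact ⟨ih1, ih2, ih3⟩
    · -- s = [a, b, c, d]
      refine ⟨?_, ?_, ih3⟩
      · show pvReorder4 (a :: b :: c :: d :: (List.filter (fun s => s.length == 4) t).flatten)
            = [d, b, a, c] ++ (List.foldl pvStepB ([], [], []) t).1
        rw [pvReorder4_cons4, ih1]
        rfl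
      · show pvXorSwap (pvExtract4 (a :: b :: c :: d :: (List.filter (fun s => s.length == 4) t).flatten))
            = [c, b] ++ (List.foldl pvStepB ([], [], []) t).2.1
        rw [pvExtract4_cons4, pvXorSwap_cons₂, ih2]
        rfl
    · exact ⟨ih1, ih2, ih3⟩

-- ===== VERDICT (by name: the statement is the Claim_ definition above) =====
theorem str_cat_ancilla_decoding_z_meas_error_include_spec : Claim_equal_str_cat_ancilla_decoding_z_meas_error_include := by
  intro anc num_qubit p _
  obtain ⟨h1, h2, h3⟩ := pvMain3 anc
  unfold Spec_str_cat_ancilla_decoding_z_meas_error_include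
  unfold str_cat_ancilla_decoding_z_meas_error_include str_cat_ancilla_decoding_z_meas_error_include_alt
  simp only [h1, h2, h3, List.nil_append, List.cons_append]
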